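-- pv_equiv track=rewrite | github.com/IKATS/ikats-pyalgo | src/ikats/algo/core/pattern/random_proj.py | regex_from_pattern_results
-- ===== SOURCE A (Python) =====
-- EMPTY_REGEX_MESSAGE = 'No Regex'
--
-- def regex_from_pattern_results(pattern_sax, alphabet_size):
--     """
--     Compute a regex representative of a given pattern sax
--     :param pattern_sax: given pattern
--     :type pattern_sax: list
--     :param alphabet_size: size of alphabet used for sax
--     :type alphabet_size: int
--
--     :return: the computed regex
--     :rtype: str
--     """
--
--     if len(pattern_sax) == 0:
--         return EMPTY_REGEX_MESSAGE
--
--     def regex_part(letters):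
--         """
--         Builds the regexp from letters
--         :param letters:
--         :return:
--         """
--         set_of_letters = set(letters)
--         length_set = len(set_of_letters)
--
--         if length_set == 1:
--             return letters[0]
--         elif length_set == alphabet_size:
--             return "*"
--         else:
--             return "[" + "".join(sorted(set_of_letters)) + "]"
--
--     return "".join([regex_part(col) for col in zip(*pattern_sax)])
-- ===== SOURCE B (Python) =====
-- EMPTY_REGEX_MESSAGE = 'No Regex'
--
-- def regex_from_pattern_results(pattern_sax, alphabet_size):
--     if len(pattern_sax) == 0:
--         return EMPTY_REGEX_MESSAGE
--     width = min(len(row) for row in pattern_sax)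
--     cells = sorted((j, row[j]) for row in pattern_sax for j in range(width))
--     pieces = []
--     i = 0
--     total = len(cells)
--     while i < total:
--         col = cells[i][0]
--         distinct = []
--         while i < total and cells[i][0] == col:
--             letter = cells[i][1]
--             if not distinct or distinct[-1] != letter:
--                 distinct.append(letter)
--             i += 1
--         if len(distinct) == 1:
--             pieces.append(distinct[0])
--         elif len(distinct) == alphabet_size:
--             pieces.append("*")
--         else:
--             pieces.append("[" + "".join(distinct) + "]")
--     return "".join(pieces)
-- ===== Notes on version B (the rewrite author's own statement) =====
-- stated objective: alternative
-- what changed: B never builds per-column sets: it flattens the pattern into (column, letter) cells, sorts them all once, and emits the regex in a single grouping scan over the sorted cells, deduplicating adjacent equal letters inside each run to get the sorted distinct letters of each column.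
import Mathlib
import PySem

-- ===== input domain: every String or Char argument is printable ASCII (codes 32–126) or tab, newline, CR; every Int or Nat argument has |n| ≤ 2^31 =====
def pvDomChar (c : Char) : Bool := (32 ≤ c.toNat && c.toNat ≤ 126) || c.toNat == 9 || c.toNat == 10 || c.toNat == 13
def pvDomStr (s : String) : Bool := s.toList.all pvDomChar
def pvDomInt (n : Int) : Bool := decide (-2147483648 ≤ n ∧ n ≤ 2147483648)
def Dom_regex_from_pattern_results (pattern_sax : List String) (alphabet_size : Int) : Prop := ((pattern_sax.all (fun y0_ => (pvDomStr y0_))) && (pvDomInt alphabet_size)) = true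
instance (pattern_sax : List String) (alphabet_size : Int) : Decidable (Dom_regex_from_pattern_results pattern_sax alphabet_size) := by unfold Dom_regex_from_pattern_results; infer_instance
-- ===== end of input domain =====

-- B replaces A's per-column set building (zip + set + sorted) with one global sort of all
-- (column, letter) cells followed by a single grouping scan; equal return value, no speed claim.

-- ===== PORT A =====

-- zip(*rows): ported by hand (variadic zip is not a PySem primitive); exact for lists of
-- lists: emits the heads while every row is nonempty, stopping at the shortest row.
def pvZipStar (rows : List (List Char)) : List (List Char) :=
  if h : rows ≠ [] ∧ rows.all (fun r => !r.isEmpty) then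
    (rows.map (fun r => r.headD 'x')) :: pvZipStar (rows.map (fun r => r.tail))
  else []
termination_by (rows.map List.length).sum
decreasing_by
  simp only [List.map_subtype, List.unattach_attach]
  rcases h with ⟨hne, hall⟩
  rcases rows with _ | ⟨r, rs⟩
  · exact absurd rfl hne
  · simp only [List.all_cons, Bool.and_eq_true, Bool.not_eq_true', List.isEmpty_eq_false_iff] at hall
    simp only [List.map_cons, List.sum_cons, List.map_map]
    have h1 : r.tail.length < r.length := by
      cases r with
      | nil => exact absurd rfl hall.1
      | cons a t => simp
    have h2 : ((rs.map (List.length ∘ List.tail)).sum) ≤ (rs.map List.length).sum := by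
      apply List.sum_le_sum
      intro x hx
      simp only [Function.comp_apply, List.length_tail]
      omega
    omega

-- inner helper regex_part(letters) of A
def pvRegexPartA (alphabet_size : Int) (letters : List Char) : String :=
  let set_of_letters := PySem.Set.ofList letters
  let length_set := PySem.Set.len set_of_letters
  if length_set = 1 then
    -- letters[0]; letters is a column of a nonempty row list here, so index 0 exists
    String.singleton ((PySem.List.pyGet? letters 0).getD 'x')
  else if (length_set : Int) = alphabet_size then "*"
  else "[" ++ String.ofList (PySem.List.sorted set_of_letters (fun c => c) false) ++ "]"

def regex_from_pattern_results (pattern_sax : List String) (alphabet_size : Int) : String :=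
  if pattern_sax.length = 0 then "No Regex"
  else String.join ((pvZipStar (pattern_sax.map String.toList)).map (pvRegexPartA alphabet_size))

-- ===== PORT B =====

-- the inner while loop of B: consume the run of cells whose column is `col`,
-- deduplicating adjacent equal letters into `distinct`; returns (distinct, remaining cells)
def pvTakeRun (col : Int) (cells : List (Int × Char)) (distinct : List Char) :
    List Char × List (Int × Char) :=
  match cells with
  | [] => (distinct, [])
  | (j, letter) :: rest =>
    if j = col then
      pvTakeRun col rest (if distinct.getLast? = some letter then distinct else distinct ++ [letter])
    else (distinct, (j, letter) :: rest)

theorem pvTakeRun_len_le (col : Int) (cells : List (Int × Char)) (d : List Char) :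
    (pvTakeRun col cells d).2.length ≤ cells.length := by
  induction cells generalizing d with
  | nil => simp [pvTakeRun]
  | cons p rest ih =>
    obtain ⟨j, letter⟩ := p
    simp only [pvTakeRun]
    split
    · exact le_trans (ih _) (by simp)
    · simp

-- fragment emitted for one column's deduplicated distinct letters
def pvFrag (alphabet_size : Int) (distinct : List Char) : String :=
  if distinct.length = 1 then String.singleton (distinct.headD 'x')
  else if (distinct.length : Int) = alphabet_size then "*"
  else "[" ++ String.ofList distinct ++ "]"

-- the outer while loop of B over the sorted cells
def pvScan (alphabet_size : Int) (cells : List (Int × Char)) : List String :=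
  match cells with
  | [] => []
  | (col, c) :: tl =>
    let r := pvTakeRun col ((col, c) :: tl) []
    pvFrag alphabet_size r.1 :: pvScan alphabet_size r.2
termination_by cells.length
decreasing_by
  simp only [pvTakeRun, if_pos rfl]
  exact Nat.lt_succ_of_le (pvTakeRun_len_le col tl _)

def regex_from_pattern_results_alt (pattern_sax : List String) (alphabet_size : Int) : String :=
  if pattern_sax.length = 0 then "No Regex"
  else
    let rows := pattern_sax.map String.toList
    let width := ((rows.map List.length).min?).getD 0   -- min(len(row) …); list nonempty here
    let cells := PySem.List.sorted2
      ((rows.map (fun row => (List.range width).map (fun (j : Nat) => ((j : Int), row.getD j 'x')))).flatten)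
      (fun p => p.1) (fun p => p.2) false
    String.join (pvScan alphabet_size cells)

-- ===== PRECONDITION & SPEC =====
def Spec_regex_from_pattern_results (pattern_sax : List String) (alphabet_size : Int) (out : String) : Prop := out = regex_from_pattern_results_alt pattern_sax alphabet_size
instance (pattern_sax : List String) (alphabet_size : Int) (out : String) : Decidable (Spec_regex_from_pattern_results pattern_sax alphabet_size out) := by unfold Spec_regex_from_pattern_results; infer_instance

-- ===== CLAIM (what is proved, stated in full; the proofs are below) =====
def Claim_equal_regex_from_pattern_results : Prop := ∀ (pattern_sax : List String) (alphabet_size : Int), Dom_regex_from_pattern_results pattern_sax alphabet_size → Spec_regex_from_pattern_results pattern_sax alphabet_size (regex_from_pattern_results pattern_sax alphabet_size)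

-- ===== LEMMAS AND PROOFS =====

-- ---- characterisation of A's zip(*rows) (as in the previous delivery) ----

def pvMinLen (rows : List (List Char)) : Nat := ((rows.map List.length).min?).getD 0

def pvColAt (rows : List (List Char)) (j : Nat) : List Char := rows.map (fun r => r.getD j 'x')

theorem pv_foldl_min_map_add (t : List Nat) (a k : Nat) :
    (t.map (· + k)).foldl min (a + k) = t.foldl min a + k := by
  induction t generalizing a with
  | nil => simp
  | cons b tl ih =>
    simp only [List.map_cons, List.foldl_cons]
    rw [Nat.add_min_add_right]
    exact ih (min a b)

theorem pv_min?_map_add (l : List Nat) (k : Nat) :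
    (l.map (· + k)).min? = l.min?.map (· + k) := by
  cases l with
  | nil => simp
  | cons a t =>
    rw [List.map_cons, List.min?_cons', List.min?_cons', pv_foldl_min_map_add]
    simp

theorem pvMinLen_tail (r : List Char) (rs : List (List Char))
    (hall : ∀ x ∈ r :: rs, x ≠ []) :
    pvMinLen (r :: rs) = pvMinLen ((r :: rs).map List.tail) + 1 := by
  have hmap : (r :: rs).map List.length = (((r :: rs).map List.tail).map List.length).map (· + 1) := by
    simp only [List.map_map]
    apply List.map_congr_left
    intro x hx
    have hx' : x ≠ [] := hall x hx
    cases x with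
    | nil => exact absurd rfl hx'
    | cons c cs => simp
  unfold pvMinLen
  rw [hmap, pv_min?_map_add]
  cases h : (((r :: rs).map List.tail).map List.length).min? with
  | none => exact absurd (List.min?_eq_none_iff.mp h) (by simp)
  | some v => simp

theorem pvMinLen_zero_of_mem_nil (rows : List (List Char)) (h : ([] : List Char) ∈ rows) :
    pvMinLen rows = 0 := by
  have h0 : (0 : Nat) ∈ rows.map List.length := List.mem_map.mpr ⟨[], h, rfl⟩
  have := List.min?_getD_le_of_mem (k := 0) h0
  unfold pvMinLen
  omega

theorem pvZipStar_eq (rows : List (List Char)) :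
    pvZipStar rows = (List.range (pvMinLen rows)).map (pvColAt rows) := by
  fun_induction pvZipStar rows with
  | case1 rows h ih =>
    rcases h with ⟨hne, hall⟩
    rcases rows with _ | ⟨r, rs⟩
    · exact absurd rfl hne
    simp only [List.map_subtype, List.unattach_attach] at ih
    have hall' : ∀ x ∈ r :: rs, x ≠ [] := by
      intro x hx
      have := List.all_eq_true.mp hall x hx
      simpa using this
    rw [ih, pvMinLen_tail r rs hall', List.range_succ_eq_map, List.map_cons]
    congr 1
    · unfold pvColAt
      rw [List.map_cons]
      congr 1
      · cases r <;> simp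
      · apply List.map_congr_left
        intro x _
        cases x <;> simp
    · rw [List.map_map]
      apply List.map_congr_left
      intro j _
      unfold pvColAt
      rw [List.map_map]
      apply List.map_congr_left
      intro x _
      cases x <;> simp
  | case2 rows h =>
    rcases rows with _ | ⟨r, rs⟩
    · simp [pvMinLen]
    · have : ∃ x ∈ r :: rs, x = [] := by
        by_contra hc
        push_neg at hc
        exact h ⟨by simp, List.all_eq_true.mpr (fun x hx => by
          simpa using hc x hx)⟩
      rcases this with ⟨x, hx, rfl⟩
      rw [pvMinLen_zero_of_mem_nil _ hx]
      simp

-- ---- generic characterisation of insertion sort (PySem's sorted2) ----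

def pvBefore (a b : Int × Char) : Bool :=
  decide (a.1 < b.1) || (!decide (b.1 < a.1) && decide (a.2 < b.2))

theorem pvBefore_true_iff (a b : Int × Char) :
    pvBefore a b = true ↔ (a.1 < b.1 ∨ (¬ b.1 < a.1 ∧ a.2 < b.2)) := by
  simp [pvBefore]

def pvR (a b : Int × Char) : Prop := pvBefore b a = false

theorem pvR_iff (a b : Int × Char) :
    pvR a b ↔ ¬ (b.1 < a.1 ∨ (¬ a.1 < b.1 ∧ b.2 < a.2)) := by
  rw [pvR, Bool.eq_false_iff, ne_eq, pvBefore_true_iff]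

theorem pvR_antisymm (a b : Int × Char) (h1 : pvR a b) (h2 : pvR b a) : a = b := by
  rw [pvR_iff, not_or, not_and_or] at h1 h2
  obtain ⟨ha, hb⟩ := h1
  obtain ⟨hc, hd⟩ := h2
  have hfst : a.1 = b.1 := by omega
  have h1' : ¬ b.2 < a.2 := by
    rcases hb with h | h
    · exact absurd (show ¬ a.1 < b.1 by omega) h
    · exact h
  have h2' : ¬ a.2 < b.2 := by
    rcases hd with h | h
    · exact absurd (show ¬ b.1 < a.1 by omega) h
    · exact h
  exact Prod.ext hfst (le_antisymm (not_lt.mp h1') (not_lt.mp h2'))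

theorem pvBefore_asym (a b : Int × Char) (h : pvBefore a b = true) : pvBefore b a = false := by
  rw [pvBefore_true_iff] at h
  rw [Bool.eq_false_iff, ne_eq, pvBefore_true_iff]
  rintro (hc | ⟨hc1, hc2⟩) <;> rcases h with h | ⟨h1, h2⟩
  · omega
  · exact h1 hc
  · exact hc1 h
  · exact lt_asymm h2 hc2

theorem pvBefore_comp (x y z : Int × Char) (h1 : pvBefore x y = true) (h2 : pvBefore z y = false) :
    pvBefore z x = false := by
  rw [pvBefore_true_iff] at h1
  rw [Bool.eq_false_iff, ne_eq, pvBefore_true_iff] at h2 ⊢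
  rw [not_or] at h2
  obtain ⟨h2a, h2b⟩ := h2
  rintro (hc | ⟨hc1, hc2⟩)
  · rcases h1 with h | ⟨hyx, _⟩ <;> omega
  · rcases h1 with h | ⟨hyx, hxy2⟩
    · omega
    · exact h2b ⟨by omega, lt_trans hc2 hxy2⟩

theorem pv_insertBy_perm (x : (Int × Char)) (ys : List (Int × Char)) :
    (PySem.List.insertBy pvBefore x ys).Perm (x :: ys) := by
  induction ys with
  | nil => rfl
  | cons y ys ih =>
    rw [PySem.List.insertBy]
    split
    · exact List.Perm.refl _
    · exact (ih.cons y).trans (List.Perm.swap x y ys)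

theorem pv_insertBy_pairwise (x : (Int × Char)) (ys : List (Int × Char))
    (h : ys.Pairwise pvR) : (PySem.List.insertBy pvBefore x ys).Pairwise pvR := by
  induction ys with
  | nil => exact List.pairwise_singleton _ _
  | cons y ys ih =>
    rw [PySem.List.insertBy]
    rcases h with _ | ⟨hy, hys⟩
    split
    · rename_i hxy
      refine List.Pairwise.cons ?_ (List.Pairwise.cons hy hys)
      intro z hz
      rcases List.mem_cons.mp hz with rfl | hz
      · exact pvBefore_asym x z hxy
      · exact pvBefore_comp x y z hxy (hy z hz)
    · rename_i hxy
      refine List.Pairwise.cons ?_ (ih hys)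
      intro z hz
      rcases (PySem.List.mem_insertBy _ _ _ _).mp hz with h | hz
      · have hx : pvBefore x y = false := by simpa using hxy
        rw [h]
        exact hx
      · exact hy z hz

theorem pv_foldl_insert_pairwise (xs acc : List (Int × Char)) (h : acc.Pairwise pvR) :
    (xs.foldl (fun acc x => PySem.List.insertBy pvBefore x acc) acc).Pairwise pvR := by
  induction xs generalizing acc with
  | nil => exact h
  | cons x xs ih => exact ih _ (pv_insertBy_pairwise x acc h)

theorem pv_foldl_insert_perm (xs acc : List (Int × Char)) :
    (xs.foldl (fun acc x => PySem.List.insertBy pvBefore x acc) acc).Perm (acc ++ xs) := by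
  induction xs generalizing acc with
  | nil => simp
  | cons x xs ih =>
    simp only [List.foldl_cons]
    refine (ih _).trans ?_
    exact ((pv_insertBy_perm x acc).append_right xs).trans List.perm_middle.symm

theorem pv_sorted2_eq_of (xs ys : List (Int × Char)) (hperm : ys.Perm xs)
    (hpw : ys.Pairwise pvR) :
    PySem.List.sorted2 xs (fun p => p.1) (fun p => p.2) false = ys := by
  have hdef : PySem.List.sorted2 xs (fun p => p.1) (fun p => p.2) false
      = xs.foldl (fun acc x => PySem.List.insertBy pvBefore x acc) [] := rfl
  rw [hdef]
  refine List.eq_of_perm_of_sorted ?_ (pv_foldl_insert_pairwise xs [] (by simp)) hpw ?_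
  · intro a b _ _ h1 h2
    exact pvR_antisymm a b h1 h2
  · exact ((pv_foldl_insert_perm xs []).trans (by simp)).trans hperm.symm

-- ---- the flattened cell list is a permutation of the column-grouped cell list ----

theorem pv_flatten_cons_perm {A B : Type} (g : B → A) (h : B → List A) (bs : List B) :
    ((bs.map (fun b => g b :: h b)).flatten).Perm (bs.map g ++ (bs.map h).flatten) := by
  induction bs with
  | nil => simp
  | cons b bs ih =>
    simp only [List.map_cons, List.flatten_cons, List.cons_append]
    refine List.Perm.cons (g b) ?_
    refine ((ih.append_left (h b)).trans ?_)
    rw [← List.append_assoc, ← List.append_assoc]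
    exact (List.perm_append_comm.append_right _)

theorem pv_transpose_perm {A B C : Type} (f : A → B → C) (as : List A) (bs : List B) :
    ((as.map (fun a => bs.map (f a))).flatten).Perm
      ((bs.map (fun b => as.map (fun a => f a b))).flatten) := by
  induction as with
  | nil => simp [List.flatten_eq_nil_iff]
  | cons a as ih =>
    simp only [List.map_cons, List.flatten_cons]
    refine (ih.append_left (bs.map (f a))).trans ?_
    have := (pv_flatten_cons_perm (fun b => f a b) (fun b => as.map (fun a => f a b)) bs).symm
    simpa [List.map_map, Function.comp] using this

theorem pv_flatten_perm_congr {A B : Type} (l : List A) (f g : A → List B)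
    (h : ∀ x ∈ l, (f x).Perm (g x)) : ((l.map f).flatten).Perm ((l.map g).flatten) := by
  induction l with
  | nil => simp
  | cons x xs ih =>
    simp only [List.map_cons, List.flatten_cons]
    exact (h x (by simp)).append (ih (fun y hy => h y (by simp [hy])))

-- ---- the column-grouped cell list: definitions and order ----

def pvSortedCol (rows : List (List Char)) (j : Nat) : List Char :=
  PySem.List.sorted (pvColAt rows j) (fun c => c) false

def pvBlock (rows : List (List Char)) (j : Nat) : List (Int × Char) :=
  (pvSortedCol rows j).map (fun c => ((j : Int), c))

def pvGroups (rows : List (List Char)) (w : Nat) : List (Int × Char) :=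
  ((List.range w).map (pvBlock rows)).flatten

theorem pv_groups_perm (rows : List (List Char)) (w : Nat) :
    (pvGroups rows w).Perm
      ((rows.map (fun row => (List.range w).map (fun (j : Nat) => ((j : Int), row.getD j 'x')))).flatten) := by
  refine List.Perm.symm ?_
  refine (pv_transpose_perm (fun row (j : Nat) => ((j : Int), row.getD j 'x')) rows (List.range w)).trans ?_
  unfold pvGroups
  refine pv_flatten_perm_congr (List.range w) _ _ ?_
  intro j _
  unfold pvBlock pvSortedCol
  have h1 : rows.map (fun row => ((j : Int), row.getD j 'x'))
      = (pvColAt rows j).map (fun c => ((j : Int), c)) := by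
    simp [pvColAt, List.map_map, Function.comp]
  rw [h1]
  exact ((PySem.List.sorted_perm _ _ _).map _).symm

theorem pv_groups_pairwise (rows : List (List Char)) (w : Nat) :
    (pvGroups rows w).Pairwise pvR := by
  unfold pvGroups
  rw [List.pairwise_flatten]
  constructor
  · intro l hl
    rcases List.mem_map.mp hl with ⟨j, _, rfl⟩
    unfold pvBlock
    rw [List.pairwise_map]
    have hs := PySem.List.sorted_pairwise (xs := pvColAt rows j) (key := fun c => c)
    refine hs.imp ?_
    intro a b hab
    rw [pvR_iff]
    rintro (hc | ⟨_, hc2⟩)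
    · exact lt_irrefl _ hc
    · exact absurd hc2 (not_lt.mpr hab)
  · have hr : (List.range w).Pairwise (· < ·) := List.pairwise_lt_range
    rw [List.pairwise_map]
    refine hr.imp ?_
    intro j1 j2 hj x hx y hy
    unfold pvBlock at hx hy
    rcases List.mem_map.mp hx with ⟨c1, _, rfl⟩
    rcases List.mem_map.mp hy with ⟨c2, _, rfl⟩
    rw [pvR_iff]
    rintro (hc | ⟨hc1, _⟩)
    · simp only at hc
      omega
    · have hj' : (j1 : Int) < (j2 : Int) := by exact_mod_cast hj
      exact hc1 hj'

-- ---- the grouping scan on the grouped cell list ----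

def pvDedup (d : List Char) (cs : List Char) : List Char :=
  cs.foldl (fun d c => if d.getLast? = some c then d else d ++ [c]) d

theorem pv_takeRun_block (col : Int) (cs : List Char) (rest : List (Int × Char))
    (d : List Char) (hrest : ∀ p ∈ rest, p.1 ≠ col) :
    pvTakeRun col (cs.map (fun c => (col, c)) ++ rest) d = (pvDedup d cs, rest) := by
  induction cs generalizing d with
  | nil =>
    simp only [List.map_nil, List.nil_append]
    cases rest with
    | nil => simp [pvTakeRun, pvDedup]
    | cons p rest' =>
      obtain ⟨j, letter⟩ := p
      have hj : j ≠ col := hrest (j, letter) (by simp)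
      simp [pvTakeRun, hj, pvDedup]
  | cons c cs ih =>
    simp only [List.map_cons, List.cons_append, pvTakeRun, if_pos rfl]
    rw [ih]
    rfl

theorem pv_scan_groups (a : Int) (gs : List (Int × List Char))
    (hne : ∀ g ∈ gs, g.2 ≠ []) (hinc : gs.Pairwise (fun g h => g.1 < h.1)) :
    pvScan a ((gs.map (fun g => g.2.map (fun c => (g.1, c)))).flatten)
      = gs.map (fun g => pvFrag a (pvDedup [] g.2)) := by
  induction gs with
  | nil => simp [pvScan]
  | cons g gs ih =>
    obtain ⟨hg, hgs⟩ := List.pairwise_cons.mp hinc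
    obtain ⟨j, cs⟩ := g
    rcases gs_ne : cs with _ | ⟨c, cs'⟩
    · exact absurd gs_ne (hne (j, cs) (by simp))
    subst gs_ne
    have hrest : ∀ p ∈ ((gs.map (fun g => g.2.map (fun c => (g.1, c)))).flatten), p.1 ≠ j := by
      intro p hp
      rcases List.mem_flatten.mp hp with ⟨l, hl, hpl⟩
      rcases List.mem_map.mp hl with ⟨g', hg', rfl⟩
      rcases List.mem_map.mp hpl with ⟨c', _, rfl⟩
      have := hg g' hg'
      simp only
      omega
    simp only [List.map_cons, List.flatten_cons, List.cons_append]
    rw [pvScan]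
    have htr := pv_takeRun_block j (c :: cs') ((gs.map (fun g => g.2.map (fun c => (g.1, c)))).flatten) [] hrest
    simp only [List.map_cons, List.cons_append] at htr
    rw [htr]
    simp only []
    rw [ih (fun g' hg' => hne g' (by simp [hg'])) hgs]

-- ---- adjacent dedup of a sorted column = sorted(set(column)) ----

theorem pv_dedup_mem (cs : List Char) (d : List Char) (x : Char) :
    x ∈ pvDedup d cs ↔ x ∈ d ∨ x ∈ cs := by
  induction cs generalizing d with
  | nil => simp [pvDedup]
  | cons c cs ih =>
    simp only [pvDedup, List.foldl_cons]
    split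
    · rename_i hlast
      rw [show cs.foldl (fun d c => if d.getLast? = some c then d else d ++ [c]) d = pvDedup d cs from rfl, ih]
      constructor
      · rintro (h | h)
        · exact Or.inl h
        · exact Or.inr (by simp [h])
      · rintro (h | h)
        · exact Or.inl h
        · rcases List.mem_cons.mp h with rfl | h
          · exact Or.inl (List.mem_of_getLast? hlast)
          · exact Or.inr h
    · rw [show cs.foldl (fun d c => if d.getLast? = some c then d else d ++ [c]) (d ++ [c]) = pvDedup (d ++ [c]) cs from rfl, ih]
      simp [or_assoc]

theorem pv_last_of_mem_of_max (d : List Char) (c : Char) (hpw : d.Pairwise (· < ·))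
    (hc : c ∈ d) (hmax : ∀ x ∈ d, x ≤ c) : d.getLast? = some c := by
  induction d with
  | nil => simp at hc
  | cons y ys ih =>
    rcases ys_eq : ys with _ | ⟨z, zs⟩
    · subst ys_eq
      simp only [List.mem_singleton] at hc
      simp [hc]
    · subst ys_eq
      obtain ⟨hy, hys⟩ := List.pairwise_cons.mp hpw
      have hcys : c ∈ z :: zs := by
        rcases List.mem_cons.mp hc with rfl | h
        · exfalso
          have hlt : c < z := hy z (by simp)
          have hle : z ≤ c := hmax z (by simp)
          exact absurd hlt (not_lt.mpr hle)
        · exact h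
      rw [List.getLast?_cons_cons]
      exact ih hys hcys (fun x hx => hmax x (by simp [hx]))

theorem pv_dedup_pairwise (cs : List Char) (d : List Char)
    (hd : d.Pairwise (· < ·)) (hcs : cs.Pairwise (· ≤ ·))
    (hcross : ∀ x ∈ d, ∀ c ∈ cs, x ≤ c) :
    (pvDedup d cs).Pairwise (· < ·) := by
  induction cs generalizing d with
  | nil => exact hd
  | cons c cs ih =>
    obtain ⟨hc, hcs'⟩ := List.pairwise_cons.mp hcs
    simp only [pvDedup, List.foldl_cons]
    by_cases hlast : d.getLast? = some c
    · rw [if_pos hlast]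
      exact ih d hd hcs' (fun x hx c' hc' => hcross x hx c' (by simp [hc']))
    · rw [if_neg hlast]
      refine ih (d ++ [c]) ?_ hcs' ?_
      · rw [List.pairwise_append]
        refine ⟨hd, List.pairwise_singleton _ _, ?_⟩
        intro x hx y hy
        rw [List.mem_singleton] at hy
        subst hy
        have hle : x ≤ y := hcross x hx y (by simp)
        rcases lt_or_eq_of_le hle with h | h
        · exact h
        · exfalso
          subst h
          exact hlast (pv_last_of_mem_of_max d x hd hx
            (fun z hz => hcross z hz x (by simp)))
      · intro x hx c' hc'
        rcases List.mem_append.mp hx with h | h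
        · exact le_trans (hcross x h c (by simp)) (hc c' hc')
        · rw [List.mem_singleton] at h
          subst h
          exact hc c' hc'

theorem pv_dedup_sorted_eq (col : List Char) :
    pvDedup [] (PySem.List.sorted col (fun c => c) false)
      = PySem.List.sorted (PySem.Set.ofList col) (fun c => c) false := by
  have hL : (pvDedup [] (PySem.List.sorted col (fun c => c) false)).Pairwise (· < ·) := by
    refine pv_dedup_pairwise _ [] (by simp) ?_ (by simp)
    exact PySem.List.sorted_pairwise (xs := col) (key := fun c => c)
  have hR : (PySem.List.sorted (PySem.Set.ofList col) (fun c => c) false).Pairwise (· < ·) :=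
    PySem.List.sorted_ofList_pairwise_lt col
  have hmem : ∀ x, x ∈ pvDedup [] (PySem.List.sorted col (fun c => c) false)
      ↔ x ∈ PySem.List.sorted (PySem.Set.ofList col) (fun c => c) false := by
    intro x
    rw [pv_dedup_mem, PySem.List.mem_sorted, PySem.List.mem_sorted, PySem.Set.mem_ofList]
    simp
  have hnodupL : (pvDedup [] (PySem.List.sorted col (fun c => c) false)).Nodup :=
    hL.imp (fun h => ne_of_lt h)
  have hnodupR : (PySem.List.sorted (PySem.Set.ofList col) (fun c => c) false).Nodup :=
    hR.imp (fun h => ne_of_lt h)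
  have hperm : (pvDedup [] (PySem.List.sorted col (fun c => c) false)).Perm
      (PySem.List.sorted (PySem.Set.ofList col) (fun c => c) false) :=
    (List.perm_ext_iff_of_nodup hnodupL hnodupR).mpr hmem
  exact List.eq_of_perm_of_sorted
    (fun a b _ _ h1 h2 => absurd h1 (not_lt.mpr (le_of_lt h2)))
    hL hR hperm

-- ---- each column's fragment agrees with A's regex_part ----

theorem pv_frag_eq (a : Int) (letters : List Char) (hne : letters ≠ []) :
    pvFrag a (pvDedup [] (PySem.List.sorted letters (fun c => c) false))
      = pvRegexPartA a letters := by
  rw [pv_dedup_sorted_eq]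
  simp only [pvFrag, pvRegexPartA]
  set L := PySem.List.sorted (PySem.Set.ofList letters) (fun c => c) false with hL
  have hlen : PySem.Set.len (PySem.Set.ofList letters) = (L.length : Int) := by
    rw [hL, PySem.List.length_sorted]
    rfl
  rw [hlen]
  by_cases h1 : L.length = 1
  · rw [if_pos h1, if_pos (show (L.length : Int) = 1 by exact_mod_cast h1)]
    obtain ⟨x, rest, rfl⟩ : ∃ x rest, letters = x :: rest := by
      rcases letters with _ | ⟨x, rest⟩
      · exact absurd rfl hne
      · exact ⟨x, rest, rfl⟩
    have hxmem : x ∈ L := by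
      rw [hL, PySem.List.mem_sorted]
      exact (PySem.Set.mem_ofList _ _).mpr (by simp)
    obtain ⟨y, hy⟩ := List.length_eq_one_iff.mp h1
    rw [hy] at hxmem
    simp only [List.mem_singleton] at hxmem
    rw [hy, ← hxmem]
    simp [PySem.List.pyGet?, PySem.List.pyIdx?]
  · have h1' : ¬ (L.length : Int) = 1 := by
      intro hc
      exact h1 (by exact_mod_cast hc)
    rw [if_neg h1, if_neg h1']

-- ===== VERDICT (by name: the statement is the Claim_ definition above) =====
theorem regex_from_pattern_results_spec : Claim_equal_regex_from_pattern_results := by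
  intro pattern_sax alphabet_size _dom
  unfold Spec_regex_from_pattern_results
  cases pattern_sax with
  | nil => simp [regex_from_pattern_results, regex_from_pattern_results_alt]
  | cons p pt =>
    simp only [regex_from_pattern_results, regex_from_pattern_results_alt,
      List.length_cons, Nat.succ_ne_zero, if_false]
    set rows := (p :: pt).map String.toList with hrows
    have hrows_ne : rows ≠ [] := by simp [hrows]
    have hw : ((rows.map List.length).min?).getD 0 = pvMinLen rows := rfl
    rw [hw]
    set w := pvMinLen rows with hwdef
    -- B side: the sorted cells are pvGroups
    have hsort : PySem.List.sorted2
        ((rows.map (fun row => (List.range w).map (fun (j : Nat) => ((j : Int), row.getD j 'x')))).flatten)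
        (fun p => p.1) (fun p => p.2) false = pvGroups rows w :=
      pv_sorted2_eq_of _ _ (pv_groups_perm rows w) (pv_groups_pairwise rows w)
    rw [hsort]
    -- the scan over the grouped cells
    have hgroups : pvGroups rows w
        = (((List.range w).map (fun (j : Nat) => (((j : Nat) : Int), pvSortedCol rows j))).map
            (fun g => g.2.map (fun c => (g.1, c)))).flatten := by
      unfold pvGroups pvBlock
      rw [List.map_map]
      rfl
    rw [hgroups, pv_scan_groups]
    · rw [pvZipStar_eq, List.map_map, List.map_map]
      apply congrArg String.join
      apply List.map_congr_left
      intro j _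
      simp only [Function.comp_apply]
      have hfe := pv_frag_eq alphabet_size (pvColAt rows j) (by simp [pvColAt, hrows])
      unfold pvSortedCol
      exact hfe.symm
    · intro g hg
      rcases List.mem_map.mp hg with ⟨j, _, rfl⟩
      simp only [ne_eq]
      unfold pvSortedCol
      rw [PySem.List.sorted_eq_nil_iff]
      simp [pvColAt, hrows]
    · rw [List.pairwise_map]
      refine List.pairwise_lt_range.imp ?_
      intro j1 j2 h
      have h' : (j1 : Int) < (j2 : Int) := by exact_mod_cast h
      exact h'
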